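-- pv_equiv track=rewrite | github.com/Quantiset/Advent-Of-Code-2023 | day14.py | tilt_left
-- ===== SOURCE A (Python) =====
-- cache = {}
--
-- def tilt_left(platform):
--     lines = platform.split("\n")
--     new_plat = []
--     for line in lines:
--         t_line = tuple(line)
--         if t_line in cache:
--             new_plat.append(cache[t_line])
--             continue
--         new_string = list(line)
--         last_lean_idx = 0
--         for char_idx in range(len(line)):
--             char = new_string[char_idx]
--             if char == "O":
--                 if char_idx != last_lean_idx:
--                     new_string[last_lean_idx] = "O"
--                     new_string[char_idx] = "."
--                     last_lean_idx += 1
--                 else: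
--                     last_lean_idx = char_idx + 1
--             if char == "#":
--                 last_lean_idx = char_idx + 1
--
--         new_string = "".join(new_string)
--         cache[t_line] = new_string
--         new_plat.append(new_string)
--
--     return "\n".join(new_plat)
-- ===== SOURCE B (Python) =====
-- def tilt_left(platform):
--     def tilt_segment(seg):
--         k = seg.count("O")
--         return "O" * k + "".join("." if c == "O" else c for c in seg[k:])
--
--     return "\n".join(
--         "#".join(tilt_segment(seg) for seg in line.split("#"))
--         for line in platform.split("\n")
--     )
-- ===== Notes on version B (the rewrite author's own statement) =====
-- stated objective: simpler
-- what changed: Replaces the in-place index/pointer simulation (mutating a char list with a last-free-slot pointer and a memo cache) by splitting each line on the barrier character, counting the rolling rocks in each segment and rebuilding the segment declaratively, then rejoining segments and lines.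
import Mathlib
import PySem

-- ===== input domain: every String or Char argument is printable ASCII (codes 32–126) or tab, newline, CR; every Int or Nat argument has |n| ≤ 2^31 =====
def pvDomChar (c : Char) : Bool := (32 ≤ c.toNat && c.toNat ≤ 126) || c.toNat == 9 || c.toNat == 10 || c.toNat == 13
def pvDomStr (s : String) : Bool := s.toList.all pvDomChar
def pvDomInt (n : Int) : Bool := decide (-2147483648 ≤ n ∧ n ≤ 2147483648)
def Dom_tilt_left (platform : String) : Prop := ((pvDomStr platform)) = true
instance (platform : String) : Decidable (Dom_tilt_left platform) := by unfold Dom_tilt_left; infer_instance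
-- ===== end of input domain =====

-- B replaces A's in-place pointer/swap simulation (and its memo cache) by split-on-'#',
-- count-the-'O's, rebuild each segment declaratively; objective: simpler.

-- ===== PORT A =====

-- One iteration of A's inner loop: state is (new_string, last_lean_idx).
-- new_string[char_idx] and the two list assignments are always in range (indices come
-- from range(len(line)) and last_lean_idx ≤ char_idx), so List.getD / List.set are exact here.
def tiltStep (st : List Char × Nat) (char_idx : Nat) : List Char × Nat :=
  let char := st.1.getD char_idx ' '
  let st1 : List Char × Nat :=
    if char = 'O' then
      if char_idx ≠ st.2 then ((st.1.set st.2 'O').set char_idx '.', st.2 + 1)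
      else (st.1, char_idx + 1)
    else st
  if char = '#' then (st1.1, char_idx + 1) else st1

-- A's per-line body: for char_idx in range(len(line)): …
def tiltLineA (line : List Char) : List Char :=
  (List.foldl tiltStep (line, 0) (List.range line.length)).1

-- A's outer loop over platform.split("\n"), threading the memo cache (keyed by the
-- character tuple tuple(line)) and accumulating new_plat; finally "\n".join(new_plat).
def tilt_left (platform : String) : String :=
  let lines : List (List Char) := PySem.Chars.splitOn platform.toList "\n".toList
  let res := lines.foldl
    (fun (st : PySem.Dict (List Char) (List Char) × List (List Char)) line =>
      match st.1.get? line with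
      | some v => (st.1, st.2 ++ [v])
      | none =>
        let new_string := tiltLineA line
        (st.1.insert line new_string, st.2 ++ [new_string]))
    (PySem.Dict.empty, [])
  String.ofList (PySem.Chars.join "\n".toList res.2)

-- ===== PORT B =====

-- B's tilt_segment: k = seg.count("O"); "O"*k + "".join("." if c=="O" else c for c in seg[k:])
def tiltSegB (seg : List Char) : List Char :=
  let k := PySem.Chars.count seg "O".toList
  List.replicate k 'O' ++ (seg.drop k).map (fun c => if c = 'O' then '.' else c)

def tilt_left_alt (platform : String) : String :=
  String.ofList (PySem.Chars.join "\n".toList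
    ((PySem.Chars.splitOn platform.toList "\n".toList).map (fun line =>
      PySem.Chars.join "#".toList
        ((PySem.Chars.splitOn line "#".toList).map tiltSegB))))

-- ===== PRECONDITION & SPEC =====
def Spec_tilt_left (platform : String) (out : String) : Prop := out = tilt_left_alt platform
instance (platform : String) (out : String) : Decidable (Spec_tilt_left platform out) := by unfold Spec_tilt_left; infer_instance

-- ===== CLAIM (what is proved, stated in full; the proofs are below) =====
def Claim_equal_tilt_left : Prop := ∀ (platform : String), Dom_tilt_left platform → Spec_tilt_left platform (tilt_left platform)

-- ===== LEMMAS AND PROOFS =====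

-- 'O' becomes '.', everything else is kept: the fate of a char that is not packed left.
def dotO (c : Char) : Char := if c = 'O' then '.' else c

-- Abstract form of A's inner loop: `mid` is the window of new_string strictly between
-- last_lean_idx and char_idx.
def specRun : List Char → List Char → List Char
  | mid, [] => mid
  | mid, c :: rest =>
    if c = '#' then mid ++ '#' :: specRun [] rest
    else if c = 'O' then 'O' :: specRun (mid.tail ++ if mid.isEmpty then [] else ['.']) rest
    else specRun (mid ++ [c]) rest

-- str.count of a single character is List.count.
theorem count_go_single (c : Char) : ∀ (fuel : Nat) (l : List Char) (acc : Nat),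
    l.length ≤ fuel → PySem.Chars.count.go [c] fuel l acc = acc + l.count c := by
  intro fuel
  induction fuel with
  | zero =>
    intro l acc h
    have : l = [] := List.eq_nil_of_length_eq_zero (Nat.le_zero.mp h)
    subst this
    simp [PySem.Chars.count.go]
  | succ f ih =>
    intro l acc h
    cases l with
    | nil => simp [PySem.Chars.count.go]
    | cons x t =>
      rw [PySem.Chars.count.go]
      by_cases hx : c = x
      · subst hx
        simp only [List.isPrefixOf, BEq.rfl, Bool.and_self, if_pos]
        simp only [List.length_cons] at h
        rw [ih _ _ (by simpa using h)]
        simp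
        omega
      · have : List.isPrefixOf [c] (x :: t) = false := by
          simp [List.isPrefixOf, hx]
        rw [this]
        simp only [Bool.false_eq_true, if_false]
        rw [ih t acc (by simpa using Nat.le_of_succ_le_succ h)]
        simp [Ne.symm hx]

theorem count_single (cs : List Char) (c : Char) :
    PySem.Chars.count cs [c] = cs.count c := by
  rw [PySem.Chars.count]
  simp only [List.isEmpty_cons, Bool.false_eq_true, if_false]
  simpa using count_go_single c cs.length cs 0 le_rfl

-- str.split on a single character, as plain structural recursion.
def mySplit (s : Char) : List Char → List Char → List (List Char)
  | cur, [] => [cur]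
  | cur, c :: rest => if c = s then cur :: mySplit s [] rest else mySplit s (cur ++ [c]) rest

theorem splitOn_go_single (s : Char) : ∀ (fuel : Nat) (l cur : List Char) (acc : List (List Char)),
    l.length < fuel →
    PySem.Chars.splitOn.go [s] fuel l cur acc = acc.reverse ++ mySplit s cur.reverse l := by
  intro fuel
  induction fuel with
  | zero => intro l cur acc h; omega
  | succ f ih =>
    intro l cur acc h
    cases l with
    | nil => simp [PySem.Chars.splitOn.go, mySplit]
    | cons x t =>
      rw [PySem.Chars.splitOn.go]
      by_cases hx : x = s
      · subst hx
        simp only [List.isPrefixOf, BEq.rfl, Bool.and_self, if_pos]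
        rw [ih _ _ _ (by simpa using h)]
        simp [mySplit]
      · have : List.isPrefixOf [s] (x :: t) = false := by
          simp [List.isPrefixOf, Ne.symm hx]
        rw [this]
        simp only [Bool.false_eq_true, if_false]
        rw [ih _ _ _ (by simpa using Nat.lt_of_succ_lt_succ h)]
        simp [mySplit, hx]

theorem splitOn_single (cs : List Char) (s : Char) :
    PySem.Chars.splitOn cs [s] = mySplit s [] cs := by
  rw [PySem.Chars.splitOn]
  simpa using splitOn_go_single s (cs.length + 1) cs [] [] (by omega)

theorem getD_append_mid (out mid rs : List Char) (c : Char) :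
    (out ++ mid ++ (c :: rs)).getD (out.length + mid.length) ' ' = c := by
  rw [List.append_assoc, List.getD_eq_getElem?_getD, List.getElem?_append_right (by simp)]
  simp

theorem set_mid (out ms rs : List Char) (m : Char) :
    ((out ++ m :: ms ++ 'O' :: rs).set out.length 'O').set (out.length + (m :: ms).length) '.'
      = (out ++ ['O']) ++ (ms ++ ['.']) ++ rs := by
  rw [show out ++ m :: ms ++ 'O' :: rs = out ++ (m :: (ms ++ 'O' :: rs)) by simp,
      List.set_append_right _ _ (le_refl out.length)]
  simp only [Nat.sub_self, List.set_cons_zero]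
  rw [show out ++ 'O' :: (ms ++ 'O' :: rs) = (out ++ 'O' :: ms) ++ 'O' :: rs by simp,
      List.set_append_right _ _ (by simp)]
  simp

-- The fold of A's inner loop, with new_string decomposed at last_lean_idx and char_idx.
theorem foldA (rest : List Char) : ∀ (out mid : List Char),
    ∃ q, List.foldl tiltStep (out ++ mid ++ rest, out.length)
        (List.range' (out.length + mid.length) rest.length)
      = (out ++ specRun mid rest, q) := by
  induction rest with
  | nil => intro out mid; exact ⟨out.length, by simp [specRun]⟩
  | cons c rs ih =>
    intro out mid
    rw [List.length_cons, List.range'_succ, List.foldl_cons]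
    by_cases hH : c = '#'
    · subst hH
      have hstep : tiltStep (out ++ mid ++ ('#' :: rs), out.length) (out.length + mid.length)
          = ((out ++ mid ++ ['#']) ++ [] ++ rs, (out ++ mid ++ ['#']).length) := by
        simp [tiltStep]
        omega
      rw [hstep]
      have h2 : out.length + mid.length + 1
          = (out ++ mid ++ ['#']).length + ([] : List Char).length := by
        simp
        omega
      rw [h2]
      obtain ⟨q, hq⟩ := ih (out ++ mid ++ ['#']) []
      refine ⟨q, ?_⟩
      rw [hq]
      simp [specRun]
    · by_cases hO : c = 'O'
      · subst hO
        cases mid with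
        | nil =>
          have hstep : tiltStep (out ++ ([] : List Char) ++ ('O' :: rs), out.length)
                (out.length + ([] : List Char).length)
              = ((out ++ ['O']) ++ ([] : List Char) ++ rs, (out ++ ['O']).length) := by
            simp [tiltStep]
          rw [hstep]
          have h2 : out.length + ([] : List Char).length + 1
              = (out ++ ['O']).length + ([] : List Char).length := by simp
          rw [h2]
          obtain ⟨q, hq⟩ := ih (out ++ ['O']) []
          exact ⟨q, by rw [hq]; simp [specRun]⟩
        | cons m ms =>
          have hstep : tiltStep (out ++ (m :: ms) ++ ('O' :: rs), out.length)
                (out.length + (m :: ms).length)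
              = ((out ++ ['O']) ++ (ms ++ ['.']) ++ rs, out.length + 1) := by
            rw [tiltStep]
            simp only [getD_append_mid, set_mid]
            simp
          rw [hstep]
          have h2 : out.length + (m :: ms).length + 1
              = (out ++ ['O']).length + (ms ++ ['.']).length := by simp; omega
          rw [h2]
          obtain ⟨q, hq⟩ := ih (out ++ ['O']) (ms ++ ['.'])
          refine ⟨q, ?_⟩
          have hp : out.length + 1 = (out ++ ['O']).length := by simp
          rw [hp, hq]
          simp [specRun]
      · have hstep : tiltStep (out ++ mid ++ (c :: rs), out.length) (out.length + mid.length)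
            = (out ++ (mid ++ [c]) ++ rs, out.length) := by
          simp [tiltStep, hO, hH]
        rw [hstep]
        have h2 : out.length + mid.length + 1 = out.length + (mid ++ [c]).length := by
          simp
          omega
        rw [h2]
        obtain ⟨q, hq⟩ := ih out (mid ++ [c])
        refine ⟨q, ?_⟩
        rw [hq]
        simp [specRun, hO, hH]

theorem tiltLineA_eq (line : List Char) : tiltLineA line = specRun [] line := by
  obtain ⟨q, hq⟩ := foldA line [] []
  simp only [List.nil_append, List.length_nil, Nat.zero_add] at hq
  rw [tiltLineA, List.range_eq_range', hq]

-- Running specRun through a '#'-free block packs its 'O's and shifts the window.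
theorem specRun_block : ∀ (seg : List Char), '#' ∉ seg → ∀ (mid rest0 : List Char),
    specRun mid (seg ++ rest0)
      = List.replicate (seg.count 'O') 'O'
        ++ specRun (List.drop (seg.count 'O') (mid ++ seg.map dotO)) rest0 := by
  intro seg
  induction seg with
  | nil => intro _ mid rest0; simp
  | cons c cs ih =>
    intro h mid rest0
    have hc : c ≠ '#' := fun e => h (e ▸ List.mem_cons_self ..)
    have hcs : '#' ∉ cs := fun e => h (List.mem_cons_of_mem _ e)
    by_cases hO : c = 'O'
    · subst hO
      rw [List.cons_append, specRun]
      simp only [if_neg hc]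
      cases mid with
      | nil =>
        rw [ih hcs (List.tail [] ++ if List.isEmpty [] then [] else ['.']) rest0]
        simp [dotO, List.replicate_succ]
      | cons m ms =>
        rw [ih hcs ((m :: ms).tail ++ if (m :: ms).isEmpty then [] else ['.']) rest0]
        simp [List.replicate_succ, dotO]
    · rw [List.cons_append, specRun]
      simp only [if_neg hc, if_neg hO]
      rw [ih hcs (mid ++ [c]) rest0]
      have : mid ++ [c] ++ cs.map dotO = mid ++ (c :: cs).map dotO := by
        simp [dotO, hO]
      rw [this]
      simp [hO]

theorem mySplit_free : ∀ (seg : List Char), '#' ∉ seg → ∀ (cur : List Char),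
    mySplit '#' cur seg = [cur ++ seg] := by
  intro seg
  induction seg with
  | nil => intro _ cur; simp [mySplit]
  | cons c cs ih =>
    intro h cur
    have hc : c ≠ '#' := fun e => h (e ▸ List.mem_cons_self ..)
    rw [mySplit, if_neg hc, ih (fun e => h (List.mem_cons_of_mem _ e))]
    simp

theorem mySplit_block : ∀ (seg : List Char), '#' ∉ seg → ∀ (cur tail : List Char),
    mySplit '#' cur (seg ++ '#' :: tail) = (cur ++ seg) :: mySplit '#' [] tail := by
  intro seg
  induction seg with
  | nil => intro _ cur tail; simp [mySplit]
  | cons c cs ih =>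
    intro h cur tail
    have hc : c ≠ '#' := fun e => h (e ▸ List.mem_cons_self ..)
    rw [List.cons_append, mySplit, if_neg hc, ih (fun e => h (List.mem_cons_of_mem _ e))]
    simp

theorem mySplit_ne_nil (s : Char) : ∀ (l cur : List Char), mySplit s cur l ≠ [] := by
  intro l
  induction l with
  | nil => intro cur; simp [mySplit]
  | cons c cs ih =>
    intro cur
    rw [mySplit]
    split
    · simp
    · exact ih _

theorem tiltSegB_free (seg : List Char) :
    tiltSegB seg
      = List.replicate (seg.count 'O') 'O' ++ (seg.map dotO).drop (seg.count 'O') := by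
  rw [tiltSegB]
  have h1 : String.toList "O" = ['O'] := by decide
  rw [h1, count_single, ← List.map_drop]
  rfl

-- Per line: A's loop equals B's split/count/rebuild, by induction on the line length.
theorem lineG : ∀ (n : Nat) (cs : List Char), cs.length ≤ n →
    specRun [] cs = PySem.Chars.join ['#'] ((mySplit '#' [] cs).map tiltSegB) := by
  intro n
  induction n with
  | zero =>
    intro cs h
    have : cs = [] := List.eq_nil_of_length_eq_zero (Nat.le_zero.mp h)
    subst this
    simp [specRun, mySplit, PySem.Chars.join_singleton, tiltSegB_free]
  | succ n ih =>
    intro cs h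
    have hdec := List.takeWhile_append_dropWhile
      (p := fun c : Char => decide (c ≠ '#')) (l := cs)
    have hseg : '#' ∉ cs.takeWhile (fun c : Char => decide (c ≠ '#')) := by
      intro hmem
      have := List.mem_takeWhile_imp hmem
      simp at this
    cases hrest : cs.dropWhile (fun c : Char => decide (c ≠ '#')) with
    | nil =>
      have hcs : cs = cs.takeWhile (fun c : Char => decide (c ≠ '#')) := by
        conv_lhs => rw [← hdec]
        rw [hrest, List.append_nil]
      have h2 := specRun_block _ hseg ([] : List Char) ([] : List Char)
      rw [List.append_nil] at h2
      rw [hcs, h2, mySplit_free _ hseg []]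
      simp [specRun, PySem.Chars.join_singleton, tiltSegB_free]
    | cons r rt =>
      have hr : r = '#' := by
        have := List.head_dropWhile_not (p := fun c : Char => decide (c ≠ '#')) (l := cs)
        rw [hrest] at this
        simpa using this (by simp)
      subst hr
      have hcs : cs = cs.takeWhile (fun c : Char => decide (c ≠ '#')) ++ '#' :: rt := by
        conv_lhs => rw [← hdec]
        rw [hrest]
      have hlen : rt.length ≤ n := by
        have := congrArg List.length hcs
        simp at this
        omega
      rw [hcs, specRun_block _ hseg [] ('#' :: rt), mySplit_block _ hseg [] rt]
      rw [specRun]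
      simp only [reduceIte]
      obtain ⟨w, ws, hw⟩ : ∃ w ws, mySplit '#' [] rt = w :: ws := by
        cases hsp : mySplit '#' ([] : List Char) rt with
        | nil => exact absurd hsp (mySplit_ne_nil '#' rt [])
        | cons w ws => exact ⟨w, ws, rfl⟩
      rw [List.map_cons, hw, List.map_cons, PySem.Chars.join_cons_cons, ← List.map_cons, ← hw,
          ← ih rt hlen]
      rw [tiltSegB_free]
      simp

theorem line_eq (line : List Char) :
    tiltLineA line
      = PySem.Chars.join "#".toList ((PySem.Chars.splitOn line "#".toList).map tiltSegB) := by
  have h1 : String.toList "#" = ['#'] := by decide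
  rw [h1, splitOn_single, tiltLineA_eq, lineG line.length line le_rfl]

-- The memo cache is output-transparent: the outer fold produces map tiltLineA.
theorem foldCache : ∀ (lines : List (List Char))
    (d : PySem.Dict (List Char) (List Char)) (acc : List (List Char)),
    (∀ k v, d.get? k = some v → v = tiltLineA k) →
    (lines.foldl
      (fun (st : PySem.Dict (List Char) (List Char) × List (List Char)) line =>
        match st.1.get? line with
        | some v => (st.1, st.2 ++ [v])
        | none =>
          let new_string := tiltLineA line
          (st.1.insert line new_string, st.2 ++ [new_string]))
      (d, acc)).2 = acc ++ lines.map tiltLineA := by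
  intro lines
  induction lines with
  | nil => intro d acc _; simp
  | cons line ls ih =>
    intro d acc hd
    rw [List.foldl_cons]
    cases hget : d.get? line with
    | some v =>
      dsimp only
      rw [ih d (acc ++ [v]) hd]
      rw [hd line v hget]
      simp
    | none =>
      dsimp only
      rw [ih (d.insert line (tiltLineA line)) (acc ++ [tiltLineA line]) ?_]
      · simp
      · intro k v hk
        by_cases hkl : k = line
        · subst hkl
          rw [PySem.Dict.get?_insert_self] at hk
          exact (Option.some_inj.mp hk).symm
        · rw [PySem.Dict.get?_insert_of_ne _ _ hkl] at hk
          exact hd k v hk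

-- ===== VERDICT (by name: the statement is the Claim_ definition above) =====
theorem tilt_left_spec : Claim_equal_tilt_left := by
  intro platform _
  unfold Spec_tilt_left tilt_left tilt_left_alt
  dsimp only
  rw [foldCache _ PySem.Dict.empty []
    (by intro k v h; simp [PySem.Dict.empty, PySem.Dict.get?] at h)]
  simp only [List.nil_append]
  congr 1
  congr 1
  exact List.map_congr_left (fun line _ => line_eq line)
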